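-- pv_equiv track=rewrite | github.com/KarolinaPSouza/dataset-pesquisa | 1082-Sum_of_Divisors/14014544.py | sigma_sum
-- ===== SOURCE A (Python) =====
-- MOD = 10**9 + 7
--
-- def sigma_sum(n):
--     res = 0
--     i = 1
--     while i <= n:
--         k = n // i
--         last = n // k
--         # Tổng các số từ i đến last = (i + last) * (last - i + 1) // 2
--         total = (i + last) * (last - i + 1) // 2
--         res += k * total
--         res %= MOD
--         i = last + 1
--     return res
-- ===== SOURCE B (Python) =====
-- MOD = 10**9 + 7
--
-- def sigma_sum(n):
--     if n <= 0:
--         return 0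
--     s = 1
--     while (s + 1) * (s + 1) <= n:
--         s += 1
--     def tri(x):
--         return x * (x + 1) // 2
--     total = 0
--     for i in range(1, n // (s + 1) + 1):
--         total += i * (n // i)
--     for q in range(1, s + 1):
--         total += q * (tri(n // q) - tri(n // (q + 1)))
--     return total % MOD
-- ===== Notes on version B (the rewrite author's own statement) =====
-- stated objective: alternative
-- what changed: Replaces A's while-loop that jumps across equal-quotient blocks with a running modulus by the sqrt-split (hyperbola) method: compute s=isqrt(n), then two bounded for-loops - i up to n//(s+1) summing i*(n//i) directly, and q up to s summing q times a difference of closed-form triangular numbers - in exact arithmetic with a single final mod.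
import Mathlib
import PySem

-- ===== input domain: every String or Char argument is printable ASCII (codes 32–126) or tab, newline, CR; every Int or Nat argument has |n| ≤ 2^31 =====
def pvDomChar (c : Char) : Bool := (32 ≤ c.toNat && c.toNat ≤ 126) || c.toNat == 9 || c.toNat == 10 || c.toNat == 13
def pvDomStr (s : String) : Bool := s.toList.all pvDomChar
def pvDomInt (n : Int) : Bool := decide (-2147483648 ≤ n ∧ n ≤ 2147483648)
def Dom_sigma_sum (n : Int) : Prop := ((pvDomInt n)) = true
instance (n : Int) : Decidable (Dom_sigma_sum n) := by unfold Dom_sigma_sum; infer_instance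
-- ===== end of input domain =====

-- B computes Σ i*(n//i) mod 10^9+7 by the sqrt-split (hyperbola) method — two for-loops up to isqrt(n) with closed-form triangular numbers, exact arithmetic, one final mod — instead of A's jumping equal-quotient while loop (objective: alternative).

def sigmaMOD : Int := 10 ^ 9 + 7

-- ===== PORT A =====
-- A's while loop as fuel recursion (fuel only makes the loop total; n.toNat + 1 steps always suffice since i strictly increases).
def sigmaLoopA (n : Int) : Nat → Int → Int → Int
  | 0, res, _ => res
  | fuel + 1, res, i =>
    if i ≤ n then
      let k := PySem.Int.floordiv n i
      let last := PySem.Int.floordiv n k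
      let total := PySem.Int.floordiv ((i + last) * (last - i + 1)) 2
      sigmaLoopA n fuel (PySem.Int.mod (res + k * total) sigmaMOD) (last + 1)
    else res

def sigma_sum (n : Int) : Int := sigmaLoopA n (n.toNat + 1) 0 1

-- ===== PORT B =====
-- B's isqrt while loop as fuel recursion (fuel only makes the loop total; n.toNat steps always suffice).
def sigmaIsqrt (n : Int) : Nat → Int → Int
  | 0, s => s
  | fuel + 1, s => if (s + 1) * (s + 1) ≤ n then sigmaIsqrt n fuel (s + 1) else s

def sigmaTri (x : Int) : Int := PySem.Int.floordiv (x * (x + 1)) 2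

def sigma_sum_alt (n : Int) : Int :=
  if n ≤ 0 then 0
  else
    let s := sigmaIsqrt n n.toNat 1
    let t1 := (PySem.List.pyRange 1 (PySem.Int.floordiv n (s + 1) + 1) 1).foldl
      (fun total i => total + i * PySem.Int.floordiv n i) 0
    let t2 := (PySem.List.pyRange 1 (s + 1) 1).foldl
      (fun total q => total + q * (sigmaTri (PySem.Int.floordiv n q)
        - sigmaTri (PySem.Int.floordiv n (q + 1)))) t1
    PySem.Int.mod t2 sigmaMOD

-- ===== PRECONDITION & SPEC =====
def Spec_sigma_sum (n : Int) (out : Int) : Prop := out = sigma_sum_alt n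
instance (n : Int) (out : Int) : Decidable (Spec_sigma_sum n out) := by unfold Spec_sigma_sum; infer_instance

-- ===== CLAIM (what is proved, stated in full; the proofs are below) =====
def Claim_equal_sigma_sum : Prop := ∀ (n : Int), Dom_sigma_sum n → Spec_sigma_sum n (sigma_sum n)

-- ===== LEMMAS AND PROOFS =====

-- the mathematical tail sum Σ_{j=i}^{n} j*(n//j)
def segSum (n i : Int) : Int :=
  ((PySem.List.pyRange i (n + 1) 1).map (fun j => j * PySem.Int.floordiv n j)).sum

theorem sigmaMOD_pos : (0 : Int) < sigmaMOD := by decide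

-- Gauss sum over an integer range, in multiplied-out form
theorem gauss2 : ∀ (d : Nat) (i l : Int), l + 1 - i = (d : Int) →
    2 * (PySem.List.pyRange i (l + 1) 1).sum = (i + l) * (l - i + 1) := by
  intro d
  induction d with
  | zero =>
    intro i l h
    rw [PySem.List.pyRange_one_eq_nil (by omega)]
    simp only [List.sum_nil]
    have : l - i + 1 = 0 := by omega
    rw [this]; ring
  | succ d ih =>
    intro i l h
    rw [PySem.List.pyRange_one_cons (by omega)]
    simp only [List.sum_cons]
    have hih := ih (i + 1) l (by omega)
    linear_combination hih

-- division bracket facts for positive operands (stated on floordiv)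
theorem fd_mul_le (a b : Int) (hb : 0 < b) : PySem.Int.floordiv a b * b ≤ a := by
  exact (PySem.Int.le_floordiv_iff_mul_le hb).mp le_rfl

theorem k_pos (n i : Int) (hi : 1 ≤ i) (hin : i ≤ n) : 1 ≤ PySem.Int.floordiv n i := by
  rw [PySem.Int.le_floordiv_iff_mul_le (by omega)]
  omega

-- the quotient is constant on the block [i, n // (n // i)]
theorem quot_const (n i j : Int) (hi : 1 ≤ i) (hin : i ≤ n) (hij : i ≤ j)
    (hj : j ≤ PySem.Int.floordiv n (PySem.Int.floordiv n i)) :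
    PySem.Int.floordiv n j = PySem.Int.floordiv n i := by
  have hkpos : 1 ≤ PySem.Int.floordiv n i := k_pos n i hi hin
  have hjpos : (0 : Int) < j := by omega
  -- k ≤ n / j : from j ≤ n / k, i.e. j * k ≤ n
  have hjk : j * PySem.Int.floordiv n i ≤ n :=
    (PySem.Int.le_floordiv_iff_mul_le (by omega)).mp hj
  have h1 : PySem.Int.floordiv n i ≤ PySem.Int.floordiv n j :=
    (PySem.Int.le_floordiv_iff_mul_le hjpos).mpr (by nlinarith)
  -- n / j ≤ k : (n/j) * i ≤ (n/j) * j ≤ n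
  have hqj : PySem.Int.floordiv n j * j ≤ n := fd_mul_le n j hjpos
  have hqnn : 0 ≤ PySem.Int.floordiv n j :=
    (PySem.Int.le_floordiv_iff_mul_le hjpos).mpr (by nlinarith)
  have h2 : PySem.Int.floordiv n j ≤ PySem.Int.floordiv n i :=
    (PySem.Int.le_floordiv_iff_mul_le (show (0:Int) < i by omega)).mpr
      (by nlinarith [mul_le_mul_of_nonneg_left hij hqnn])
  omega

-- one block of A contributes k * total = Σ_{j=i}^{last} j*(n//j)
theorem i_le_last (n i : Int) (hi : 1 ≤ i) (hin : i ≤ n) :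
    i ≤ PySem.Int.floordiv n (PySem.Int.floordiv n i) := by
  have hkpos : 1 ≤ PySem.Int.floordiv n i := k_pos n i hi hin
  exact (PySem.Int.le_floordiv_iff_mul_le (by omega)).mpr
    (by nlinarith [fd_mul_le n i (show (0:Int) < i by omega)])

theorem block_sum (n i : Int) (hi : 1 ≤ i) (hin : i ≤ n) :
    PySem.Int.floordiv n i *
      PySem.Int.floordiv ((i + PySem.Int.floordiv n (PySem.Int.floordiv n i)) *
        (PySem.Int.floordiv n (PySem.Int.floordiv n i) - i + 1)) 2
      = ((PySem.List.pyRange i (PySem.Int.floordiv n (PySem.Int.floordiv n i) + 1) 1).map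
          (fun j => j * PySem.Int.floordiv n j)).sum := by
  set k := PySem.Int.floordiv n i with hk
  set last := PySem.Int.floordiv n k with hlast
  have hkpos : 1 ≤ k := k_pos n i hi hin
  have hil : i ≤ last := i_le_last n i hi hin
  -- each j in the block has quotient k
  have hmap : ((PySem.List.pyRange i (last + 1) 1).map (fun j => j * PySem.Int.floordiv n j))
      = ((PySem.List.pyRange i (last + 1) 1).map (fun j => j * k)) := by
    apply List.map_congr_left
    intro j hj
    rw [PySem.List.mem_pyRange_one] at hj
    rw [quot_const n i j hi hin hj.1 (by rw [← hk, ← hlast]; omega)]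
  rw [hmap]
  have hsum : ((PySem.List.pyRange i (last + 1) 1).map (fun j => j * k)).sum
      = (PySem.List.pyRange i (last + 1) 1).sum * k := by
    induction (PySem.List.pyRange i (last + 1) 1) with
    | nil => simp
    | cons x xs ih => simp only [List.map_cons, List.sum_cons, ih]; ring
  rw [hsum]
  have hg := gauss2 (last + 1 - i).toNat i last (by omega)
  have htot : PySem.Int.floordiv ((i + last) * (last - i + 1)) 2
      = (PySem.List.pyRange i (last + 1) 1).sum := by
    rw [← hg]
    rw [PySem.Int.floordiv_eq_ediv_of_pos (by decide)]
    omega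
  rw [htot]; ring

-- a fold that only adds is the sum of the mapped list
theorem foldl_add_map (g : Int → Int) : ∀ (xs : List Int) (t : Int),
    xs.foldl (fun a x => a + g x) t = t + (xs.map g).sum := by
  intro xs
  induction xs with
  | nil => intro t; simp
  | cons x xs ih => intro t; simp only [List.foldl_cons, List.map_cons, List.sum_cons, ih]; ring

theorem isqrt_ge_one (n : Int) : ∀ (fuel : Nat) (s : Int), 1 ≤ s → 1 ≤ sigmaIsqrt n fuel s := by
  intro fuel
  induction fuel with
  | zero => intro s hs; simpa [sigmaIsqrt] using hs
  | succ fuel ih =>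
    intro s hs
    simp only [sigmaIsqrt]
    split
    · exact ih (s + 1) (by omega)
    · exact hs

theorem tri_two (x : Int) : 2 * sigmaTri x = x * (x + 1) := by
  rw [sigmaTri, PySem.Int.floordiv_eq_ediv_of_pos (by decide)]
  exact Int.mul_ediv_cancel' (Int.even_mul_succ_self x).two_dvd

theorem fd_nonneg (n b : Int) (hn : 0 ≤ n) (hb : 0 < b) : 0 ≤ PySem.Int.floordiv n b :=
  (PySem.Int.le_floordiv_iff_mul_le hb).mpr (by nlinarith)

-- on the interval (n//(q+1), n//q] the quotient is exactly q
theorem quot_const2 (n q i : Int) (hn : 1 ≤ n) (hq : 1 ≤ q)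
    (h1 : PySem.Int.floordiv n (q + 1) < i) (h2 : i ≤ PySem.Int.floordiv n q) :
    PySem.Int.floordiv n i = q := by
  have hi : (0 : Int) < i := by
    have := fd_nonneg n (q + 1) (by omega) (by omega)
    omega
  have hl : q ≤ PySem.Int.floordiv n i := by
    have hiq : i * q ≤ n := (PySem.Int.le_floordiv_iff_mul_le (by omega)).mp h2
    exact (PySem.Int.le_floordiv_iff_mul_le hi).mpr (by nlinarith)
  have hu : PySem.Int.floordiv n i < q + 1 := by
    have hlt : n < i * (q + 1) := (PySem.Int.floordiv_lt_iff_lt_mul (by omega)).mp h1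
    exact (PySem.Int.floordiv_lt_iff_lt_mul hi).mpr (by nlinarith)
  omega

-- the telescoping second loop of B equals the tail Σ_{i=n//(q+1)+1}^{n} i*(n//i)
theorem telescope (n : Int) (hn : 1 ≤ n) : ∀ (d : Nat) (q : Int), q = (d : Int) →
    ((PySem.List.pyRange 1 (q + 1) 1).map
        (fun p => p * (sigmaTri (PySem.Int.floordiv n p) - sigmaTri (PySem.Int.floordiv n (p + 1))))).sum
      = ((PySem.List.pyRange (PySem.Int.floordiv n (q + 1) + 1) (n + 1) 1).map
          (fun i => i * PySem.Int.floordiv n i)).sum := by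
  intro d
  induction d with
  | zero =>
    intro q hq
    rw [show q = (0 : Int) by omega]
    have h1 : PySem.Int.floordiv n (0 + 1) = n := by
      rw [PySem.Int.floordiv_eq_ediv_of_pos (by norm_num)]; simp
    rw [h1, PySem.List.pyRange_one_eq_nil (by omega), PySem.List.pyRange_one_eq_nil (by omega)]
    simp
  | succ d ih =>
    intro q hq
    have hq1 : 1 ≤ q := by omega
    set a := PySem.Int.floordiv n (q + 1) with ha
    set b := PySem.Int.floordiv n q with hb
    have hb_mul : b * q ≤ n := fd_mul_le n q (by omega)
    have ha_mul : a * (q + 1) ≤ n := fd_mul_le n (q + 1) (by omega)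
    have ha0 : 0 ≤ a := fd_nonneg n (q + 1) (by omega) (by omega)
    have hb0 : 0 ≤ b := fd_nonneg n q (by omega) (by omega)
    have hab : a ≤ b := by
      rw [hb]
      exact (PySem.Int.le_floordiv_iff_mul_le (by omega)).mpr (by nlinarith)
    have hbn : b ≤ n := by nlinarith
    -- left side: split off the last term q
    rw [show q + 1 = (q - 1) + 1 + 1 by ring, PySem.List.pyRange_one_succ_right (by omega),
      List.map_append, List.sum_append, show q - 1 + 1 = q by ring]
    have hih := ih (q - 1) (by omega)
    rw [show q - 1 + 1 = q by ring, ← hb] at hih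
    rw [hih,
      PySem.List.pyRange_one_append (a + 1) (b + 1) (n + 1) (by omega) (by omega),
      List.map_append, List.sum_append]
    -- the block [a+1, b] has constant quotient q
    have hmap : ((PySem.List.pyRange (a + 1) (b + 1) 1).map (fun i => i * PySem.Int.floordiv n i))
        = ((PySem.List.pyRange (a + 1) (b + 1) 1).map (fun i => i * q)) := by
      apply List.map_congr_left
      intro j hj
      rw [PySem.List.mem_pyRange_one] at hj
      rw [quot_const2 n q j hn hq1 (by omega) (by omega)]
    have hsum : ((PySem.List.pyRange (a + 1) (b + 1) 1).map (fun i => i * q)).sum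
        = (PySem.List.pyRange (a + 1) (b + 1) 1).sum * q := by
      induction (PySem.List.pyRange (a + 1) (b + 1) 1) with
      | nil => simp
      | cons x xs ihl => simp only [List.map_cons, List.sum_cons, ihl]; ring
    have hg := gauss2 (b + 1 - (a + 1)).toNat (a + 1) b (by omega)
    have hblock : ((PySem.List.pyRange (a + 1) (b + 1) 1).map (fun i => i * PySem.Int.floordiv n i)).sum
        = q * (sigmaTri b - sigmaTri a) := by
      rw [hmap, hsum]
      have h2 : 2 * ((PySem.List.pyRange (a + 1) (b + 1) 1).sum * q)
          = 2 * (q * (sigmaTri b - sigmaTri a)) := by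
        linear_combination q * hg - q * tri_two b + q * tri_two a
      omega
    rw [hblock]
    simp only [List.map_cons, List.sum_cons, List.map_nil, List.sum_nil]
    rw [← hb, ← ha]
    ring

-- A's loop computes (res + Σ_{j=i}^{n} j*(n//j)) % MOD
theorem loopA_eq (n : Int) : ∀ (fuel : Nat) (i res : Int), 1 ≤ i →
    (n + 1 - i).toNat ≤ fuel → 0 ≤ res → res < sigmaMOD →
    sigmaLoopA n fuel res i = (res + segSum n i) % sigmaMOD := by
  intro fuel
  induction fuel with
  | zero =>
    intro i res hi hf h0 h1
    have hni : n < i := by omega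
    simp only [sigmaLoopA]
    rw [segSum, PySem.List.pyRange_one_eq_nil (by omega)]
    simp [Int.emod_eq_of_lt h0 h1]
  | succ fuel ih =>
    intro i res hi hf h0 h1
    simp only [sigmaLoopA]
    by_cases hin : i ≤ n
    · rw [if_pos hin]
      set k := PySem.Int.floordiv n i with hk
      set last := PySem.Int.floordiv n k with hlast
      have hkpos : 1 ≤ k := k_pos n i hi hin
      have hil : i ≤ last := i_le_last n i hi hin
      have hln : last ≤ n := by
        nlinarith [fd_mul_le n k (show (0:Int) < k by omega)]
      rw [PySem.Int.mod_eq_emod_of_pos sigmaMOD_pos]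
      rw [ih (last + 1) _ (by omega) (by omega)
        (Int.emod_nonneg _ (by decide)) (Int.emod_lt_of_pos _ sigmaMOD_pos)]
      have hsplit : segSum n i
          = ((PySem.List.pyRange i (last + 1) 1).map (fun j => j * PySem.Int.floordiv n j)).sum
            + segSum n (last + 1) := by
        rw [segSum, segSum, PySem.List.pyRange_one_append i (last + 1) (n + 1) (by omega) (by omega),
          List.map_append, List.sum_append]
      have hblk := block_sum n i hi hin
      rw [← hk, ← hlast] at hblk
      rw [Int.emod_add_emod, hsplit, ← hblk]
      ring_nf
    · rw [if_neg hin]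
      rw [segSum, PySem.List.pyRange_one_eq_nil (by omega)]
      simp [Int.emod_eq_of_lt h0 h1]

-- ===== VERDICT (by name: the statement is the Claim_ definition above) =====
theorem sigma_sum_spec : Claim_equal_sigma_sum := by
  intro n _
  simp only [Spec_sigma_sum, sigma_sum, sigma_sum_alt]
  rw [loopA_eq n (n.toNat + 1) 1 0 le_rfl (by omega) le_rfl sigmaMOD_pos]
  by_cases hn : n ≤ 0
  · rw [if_pos hn, segSum, PySem.List.pyRange_one_eq_nil (by omega)]
    simp
  · rw [if_neg hn]
    set s := sigmaIsqrt n n.toNat 1 with hs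
    have hs1 : 1 ≤ s := isqrt_ge_one n n.toNat 1 le_rfl
    have hm0 : 0 ≤ PySem.Int.floordiv n (s + 1) := fd_nonneg n (s + 1) (by omega) (by omega)
    have hmn : PySem.Int.floordiv n (s + 1) ≤ n := by
      nlinarith [fd_mul_le n (s + 1) (show (0 : Int) < s + 1 by omega)]
    rw [foldl_add_map (fun i => i * PySem.Int.floordiv n i),
      foldl_add_map (fun q => q * (sigmaTri (PySem.Int.floordiv n q)
        - sigmaTri (PySem.Int.floordiv n (q + 1)))),
      telescope n (by omega) s.toNat s (by omega),
      PySem.Int.mod_eq_emod_of_pos sigmaMOD_pos]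
    congr 1
    rw [segSum, PySem.List.pyRange_one_append 1 (PySem.Int.floordiv n (s + 1) + 1) (n + 1)
      (by omega) (by omega), List.map_append, List.sum_append]
    ring
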